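-- pv_equiv track=rewrite | github.com/mladiradi/python_coding | fundamentals_tasks/which_are_in.py | sub_in_main_strngs
-- ===== SOURCE A (Python) =====
-- def sub_in_main_strngs(sub, full):
--     sub_lst = []
--
--     for curr_sub in sub:
--         for curr_full in full:
--             if curr_sub in curr_full:
--                 sub_lst.append(curr_sub)
--                 break
--     return sub_lst
-- ===== SOURCE B (Python) =====
-- def sub_in_main_strngs(sub, full):
--     pending = list(dict.fromkeys(sub))
--     for curr_full in full:
--         if not pending:
--             break
--         pending = [s for s in pending if s not in curr_full]
--     missed = set(pending)
--     return [s for s in sub if s not in missed]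
-- ===== Notes on version B (the rewrite author's own statement) =====
-- stated objective: alternative
-- what changed: Inverted the loop nesting: a single pass over the full strings prunes a shrinking worklist of distinct not-yet-found subs (stopping when it empties), then one order-preserving filter of sub against the missed set replaces A's per-sub inner scan with break.
import Mathlib
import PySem

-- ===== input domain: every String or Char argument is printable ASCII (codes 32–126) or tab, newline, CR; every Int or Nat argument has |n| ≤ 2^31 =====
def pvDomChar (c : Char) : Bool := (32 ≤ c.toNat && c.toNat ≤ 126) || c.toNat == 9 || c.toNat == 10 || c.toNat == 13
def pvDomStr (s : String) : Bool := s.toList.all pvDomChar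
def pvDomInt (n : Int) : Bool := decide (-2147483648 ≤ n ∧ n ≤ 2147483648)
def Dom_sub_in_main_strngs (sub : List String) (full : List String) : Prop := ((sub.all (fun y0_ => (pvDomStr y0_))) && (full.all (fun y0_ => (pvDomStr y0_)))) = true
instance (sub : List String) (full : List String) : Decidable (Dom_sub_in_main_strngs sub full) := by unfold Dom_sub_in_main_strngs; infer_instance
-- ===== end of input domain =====

-- B inverts A's loop nesting: one pass over full prunes a worklist of distinct not-yet-found
-- subs, then one filter of sub against the missed set; same cost, different traversal (alternative).


-- ===== PORT A =====
-- inner loop over full with break: append curr_sub on the first containing string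
def pvAInner (currSub : String) (full : List String) (acc : List String) : List String :=
  match full with
  | [] => acc
  | f :: rest => if PySem.Str.isIn currSub f then acc ++ [currSub] else pvAInner currSub rest acc

def sub_in_main_strngs (sub : List String) (full : List String) : List String :=
  sub.foldl (fun subLst currSub => pvAInner currSub full subLst) []

-- ===== PORT B =====
-- outer loop over full, pruning the worklist of not-yet-found subs; break when empty
def pvBLoop (full : List String) (pending : List String) : List String :=
  match full with
  | [] => pending
  | f :: rest =>
      if pending.isEmpty then pending
      else pvBLoop rest (pending.filter (fun s => !(PySem.Str.isIn s f)))

def sub_in_main_strngs_alt (sub : List String) (full : List String) : List String :=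
  let pending := pvBLoop full (PySem.List.dedup sub)
  let missed := PySem.Set.ofList pending
  sub.filter (fun s => !(PySem.Set.contains missed s))

-- ===== PRECONDITION & SPEC =====
def Spec_sub_in_main_strngs (sub : List String) (full : List String) (out : List String) : Prop := out = sub_in_main_strngs_alt sub full
instance (sub : List String) (full : List String) (out : List String) : Decidable (Spec_sub_in_main_strngs sub full out) := by unfold Spec_sub_in_main_strngs; infer_instance

-- ===== CLAIM (what is proved, stated in full; the proofs are below) =====
def Claim_equal_sub_in_main_strngs : Prop := ∀ (sub : List String) (full : List String), Dom_sub_in_main_strngs sub full → Spec_sub_in_main_strngs sub full (sub_in_main_strngs sub full)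

-- ===== LEMMAS AND PROOFS =====

-- A's inner loop appends currSub iff some full string contains it
theorem pvAInner_eq (currSub : String) (full : List String) (acc : List String) :
    pvAInner currSub full acc
      = acc ++ (if full.any (fun f => PySem.Str.isIn currSub f) then [currSub] else []) := by
  induction full with
  | nil => simp [pvAInner]
  | cons f rest ih =>
      unfold pvAInner
      rw [ih, List.any_cons]
      clear ih
      split_ifs with h1 h2 h3 <;> try simp_all
      rename_i hex
      obtain ⟨x, hx, hc⟩ := hex
      exact absurd (h3 x hx) (by simp [hc])

-- A computes the filter of sub by "some full string contains it"
theorem portA_eq_filter (sub full : List String) :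
    sub_in_main_strngs sub full
      = sub.filter (fun s => full.any (fun f => PySem.Str.isIn s f)) := by
  unfold sub_in_main_strngs
  suffices h : ∀ acc : List String,
      sub.foldl (fun subLst currSub => pvAInner currSub full subLst) acc
        = acc ++ sub.filter (fun s => full.any (fun f => PySem.Str.isIn s f)) by
    simpa using h []
  induction sub with
  | nil => intro acc; simp
  | cons s rest ih =>
      intro acc
      rw [List.foldl_cons, ih, pvAInner_eq, List.filter_cons]
      clear ih
      split_ifs with h
      · rw [List.append_assoc, List.singleton_append]
      · rw [List.append_nil]

-- the worklist after the outer loop: exactly the subs no processed full string contains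
theorem mem_pvBLoop (full : List String) (pending : List String) (x : String) :
    x ∈ pvBLoop full pending
      ↔ x ∈ pending ∧ ∀ f ∈ full, PySem.Str.isIn x f = false := by
  induction full generalizing pending with
  | nil => simp [pvBLoop]
  | cons f rest ih =>
      rw [pvBLoop]
      by_cases hp : pending.isEmpty
      · rw [if_pos hp]
        rw [List.isEmpty_iff] at hp
        subst hp
        simp
      · rw [if_neg hp, ih]
        simp only [List.mem_filter, Bool.not_eq_eq_eq_not, Bool.not_true,
          List.forall_mem_cons]
        tauto

theorem sub_in_main_strngs_spec : Claim_equal_sub_in_main_strngs := by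
  intro sub full _
  unfold Spec_sub_in_main_strngs
  simp only [sub_in_main_strngs_alt]
  rw [portA_eq_filter]
  apply List.filter_congr
  intro x hx
  rw [Bool.eq_iff_iff, List.any_eq_true, Bool.not_eq_true', Bool.eq_false_iff, Ne,
    PySem.Set.contains_iff, PySem.Set.mem_ofList, mem_pvBLoop]
  constructor
  · rintro ⟨g, hg, hgf⟩ ⟨_, hall⟩
    have := hall g hg
    rw [hgf] at this
    simp at this
  · intro h
    by_contra hno
    push Not at hno
    exact h ⟨(PySem.List.mem_dedup sub x).mpr hx, fun f hf => by
      have := hno f hf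
      revert this
      cases PySem.Str.isIn x f <;> simp⟩
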